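-- pv_equiv track=rewrite | github.com/LiQian2023/daily_practice_py | 25.06.11_leetcode/practice.py | countPartitions1
-- ===== SOURCE A (Python) =====
-- def countPartitions1(nums):
--     """
--     :type nums: List[int]
--     :rtype: int
--     """
--     suffix = sum(nums)
--     prefix = 0
--     ans = 0
--     length = len(nums)
--     for i in range(length - 1):
--         prefix += nums[i]
--         suffix -= nums[i]
--         if (prefix - suffix) % 2 == 0:
--             ans += 1
--     return ans
-- ===== SOURCE B (Python) =====
-- def countPartitions1(nums):
--     # prefix - suffix = 2*prefix - total, so its parity is that of total,
--     # independent of the split point: every split counts iff total is even.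
--     if sum(nums) % 2 == 0:
--         return max(len(nums) - 1, 0)
--     return 0
-- ===== Notes on version B (the rewrite author's own statement) =====
-- stated objective: faster
-- what changed: Replaces the per-split loop by the closed form: since (prefix - suffix) % 2 == sum(nums) % 2 for every split, return max(len(nums)-1, 0) if the total is even else 0.
import Mathlib
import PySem

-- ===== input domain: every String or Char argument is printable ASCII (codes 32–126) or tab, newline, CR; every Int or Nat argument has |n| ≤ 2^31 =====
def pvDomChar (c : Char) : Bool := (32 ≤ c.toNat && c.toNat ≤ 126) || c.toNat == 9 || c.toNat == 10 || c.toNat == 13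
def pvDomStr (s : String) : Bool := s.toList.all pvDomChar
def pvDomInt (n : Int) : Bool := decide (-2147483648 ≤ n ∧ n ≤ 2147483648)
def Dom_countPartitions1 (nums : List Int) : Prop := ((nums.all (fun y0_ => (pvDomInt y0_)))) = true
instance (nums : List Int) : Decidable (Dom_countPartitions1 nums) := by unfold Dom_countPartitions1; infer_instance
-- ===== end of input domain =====

-- B replaces A's per-split loop by the closed form max(len-1,0) / 0 keyed on the parity of sum(nums).

-- ===== PORT A =====
-- literal port of A's loop over range(length-1), state (pfx, sfx, ans)
def countPartitions1 (nums : List Int) : Int :=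
  let sfx := nums.sum
  let pfx := (0 : Int)
  let ans := (0 : Int)
  let length : Int := nums.length
  let st := (PySem.List.pyRange 0 (length - 1) 1).foldl
    (fun (st : Int × Int × Int) i =>
      let pfx := st.1 + PySem.List.pyGetD nums i 0
      let sfx := st.2.1 - PySem.List.pyGetD nums i 0
      let ans := if (pfx - sfx) % 2 = 0 then st.2.2 + 1 else st.2.2
      (pfx, sfx, ans))
    (pfx, sfx, ans)
  st.2.2

-- ===== PORT B =====
def countPartitions1_alt (nums : List Int) : Int :=
  if nums.sum % 2 = 0 then max ((nums.length : Int) - 1) 0 else 0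

-- ===== PRECONDITION & SPEC =====
def Spec_countPartitions1 (nums : List Int) (out : Int) : Prop := out = countPartitions1_alt nums
instance (nums : List Int) (out : Int) : Decidable (Spec_countPartitions1 nums out) := by unfold Spec_countPartitions1; infer_instance

-- ===== CLAIM (what is proved, stated in full; the proofs are below) =====
def Claim_equal_countPartitions1 : Prop := ∀ (nums : List Int), Dom_countPartitions1 nums → Spec_countPartitions1 nums (countPartitions1 nums)

-- ===== LEMMAS AND PROOFS =====

-- the loop's ans depends only on the parity of pfx - sfx, which each step preserves
theorem pv_loop (nums : List Int) (l : List Int) (p s a : Int) :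
    ((l.foldl
      (fun (st : Int × Int × Int) i =>
        let pfx := st.1 + PySem.List.pyGetD nums i 0
        let sfx := st.2.1 - PySem.List.pyGetD nums i 0
        let ans := if (pfx - sfx) % 2 = 0 then st.2.2 + 1 else st.2.2
        (pfx, sfx, ans))
      (p, s, a)).2.2) = a + (if (p - s) % 2 = 0 then (l.length : Int) else 0) := by
  induction l generalizing p s a with
  | nil => simp
  | cons x t ih =>
    simp only [List.foldl_cons, List.length_cons]
    rw [ih]
    have hpar : (p + PySem.List.pyGetD nums x 0 - (s - PySem.List.pyGetD nums x 0)) % 2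
        = (p - s) % 2 := by omega
    rw [hpar]
    split_ifs <;> push_cast <;> ring

theorem countPartitions1_spec : Claim_equal_countPartitions1 := by
  intro nums _
  unfold Spec_countPartitions1 countPartitions1 countPartitions1_alt
  simp only []
  rw [pv_loop]
  have h0 : (0 - nums.sum) % 2 = nums.sum % 2 := by omega
  rw [h0, PySem.List.length_pyRange_one]
  split_ifs with h
  · simp; omega
  · ring
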